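-- pv_equiv track=rewrite | github.com/Gradata/gradata | src/gradata/detection/addition_pattern.py | is_addition
-- ===== SOURCE A (Python) =====
-- def is_addition(old: str, new: str, min_added_chars: int = 10) -> bool:
--     """True when *new* contains *old* plus added content (insertion, not replacement).
--
--     - Empty old + non-empty new (>= min_added_chars) counts as addition.
--     - Returns False if old changed significantly or added content is too short.
--     """
--     if not isinstance(min_added_chars, int) or min_added_chars < 0:
--         raise ValueError(f"min_added_chars must be a non-negative integer, got {min_added_chars}")
--
--     # Empty old, non-empty new = new file content
--     if not old and new and len(new) >= min_added_chars:
--         return True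
--
--     if not old or not new:
--         return False
--
--     # Check if old is a subsequence of new (all chars of old appear in order in new)
--     if len(new) < len(old):
--         return False
--
--     # Two-pointer subsequence scan
--     old_idx = 0
--     new_idx = 0
--     while old_idx < len(old) and new_idx < len(new):
--         if old[old_idx] == new[new_idx]:
--             old_idx += 1
--         new_idx += 1
--
--     # If we didn't match all of old, it's not a subsequence
--     if old_idx < len(old):
--         return False
--
--     added = len(new) - len(old)
--     return added >= min_added_chars
-- ===== SOURCE B (Python) =====
-- def is_addition(old: str, new: str, min_added_chars: int = 10) -> bool:
--     """True when *new* contains *old* plus added content (insertion, not replacement)."""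
--     if not isinstance(min_added_chars, int) or min_added_chars < 0:
--         raise ValueError(f"min_added_chars must be a non-negative integer, got {min_added_chars}")
--
--     if not old and new and len(new) >= min_added_chars:
--         return True
--
--     if not old or not new:
--         return False
--
--     if len(new) < len(old):
--         return False
--
--     # Inverted index over new: character -> ascending list of its positions.
--     pos = {}
--     for i, ch in enumerate(new):
--         pos.setdefault(ch, []).append(i)
--
--     # Walk old through the index with one resume pointer per character:
--     # for each char, advance its pointer past positions <= the previous match
--     # (pointers never rewind, so the whole walk is amortized linear).
--     ptr = {}
--     cur = -1
--     for ch in old: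
--         lst = pos.get(ch, [])
--         i = ptr.get(ch, 0)
--         while i < len(lst) and lst[i] <= cur:
--             i += 1
--         if i == len(lst):
--             return False
--         cur = lst[i]
--         ptr[ch] = i + 1
--
--     return len(new) - len(old) >= min_added_chars
-- ===== Notes on version B (the rewrite author's own statement) =====
-- stated objective: alternative
-- what changed: Replaces A's two-pointer scan over new with an inverted index built in one pass (char -> ascending position list) that old is walked through with per-char resume pointers, taking for each char the first indexed position beyond the previous match; A's guards are kept.
import Mathlib
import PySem

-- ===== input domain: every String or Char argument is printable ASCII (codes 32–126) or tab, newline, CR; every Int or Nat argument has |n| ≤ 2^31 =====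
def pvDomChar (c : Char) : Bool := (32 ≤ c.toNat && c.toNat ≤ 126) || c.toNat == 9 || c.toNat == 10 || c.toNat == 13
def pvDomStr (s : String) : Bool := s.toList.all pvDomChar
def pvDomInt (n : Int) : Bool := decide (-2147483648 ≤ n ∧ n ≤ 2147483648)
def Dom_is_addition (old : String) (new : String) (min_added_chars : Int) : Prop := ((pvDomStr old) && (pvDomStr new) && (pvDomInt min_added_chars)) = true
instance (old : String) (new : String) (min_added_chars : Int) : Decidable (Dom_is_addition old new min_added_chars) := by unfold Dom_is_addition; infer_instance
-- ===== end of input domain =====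

-- B replaces A's two-pointer scan with an inverted index over new (char -> ascending
-- position list) walked with per-char resume pointers (objective: alternative);
-- return-value equivalence is proved on Pre_ (min_added_chars ≥ 0).

-- ===== PORT A =====
-- A's while loop: advances new_idx over new, bumping old_idx on a match; returns final old_idx.
def loopA (old : List Char) (oi : Nat) : List Char → Nat
  | [] => oi
  | c :: rest =>
    if h : oi < old.length then
      loopA old (if old[oi]'h == c then oi + 1 else oi) rest
    else oi

def is_addition (old : String) (new : String) (min_added_chars : Int) : Bool :=
  -- Python raises ValueError for min_added_chars < 0 (excluded by Pre_); the port returns false there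
  if min_added_chars < 0 then false
  else if old.toList.isEmpty && (!new.toList.isEmpty) && decide ((new.toList.length : Int) ≥ min_added_chars) then true
  else if old.toList.isEmpty || new.toList.isEmpty then false
  else if new.toList.length < old.toList.length then false
  else if loopA old.toList 0 new.toList < old.toList.length then false
  else decide (((new.toList.length : Int) - old.toList.length) ≥ min_added_chars)

-- ===== PORT B =====
-- 'for i, ch in enumerate(new): pos.setdefault(ch, []).append(i)' — the inverted index
def buildPos (ns : List Char) : PySem.Dict Char (List Int) :=
  (PySem.List.enumerate ns 0).foldl (fun d p => d.modify p.2 [] (· ++ [p.1])) PySem.Dict.empty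

-- 'while i < len(lst) and lst[i] <= cur: i += 1' — advance the resume pointer past cur
def advance (cur : Int) (lst : List Int) (i : Nat) : Nat :=
  if h : i < lst.length then
    if lst.getD i 0 ≤ cur then advance cur lst (i + 1) else i
  else i
termination_by lst.length - i

-- B's walk of old through the index, carrying the previous match and the pointer dict
def loopPtr (pos : PySem.Dict Char (List Int)) (ptr : PySem.Dict Char Nat) (cur : Int) : List Char → Bool
  | [] => true
  | c :: os =>
    let lst := pos.getD c []
    let i := advance cur lst (ptr.getD c 0)
    if i < lst.length then
      loopPtr pos (ptr.insert c (i + 1)) (lst.getD i 0) os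
    else false

def is_addition_alt (old : String) (new : String) (min_added_chars : Int) : Bool :=
  -- Python raises ValueError for min_added_chars < 0 (excluded by Pre_); the port returns false there
  if min_added_chars < 0 then false
  else if old.toList.isEmpty && (!new.toList.isEmpty) && decide ((new.toList.length : Int) ≥ min_added_chars) then true
  else if old.toList.isEmpty || new.toList.isEmpty then false
  else if new.toList.length < old.toList.length then false
  else if loopPtr (buildPos new.toList) PySem.Dict.empty (-1) old.toList then
    decide (((new.toList.length : Int) - old.toList.length) ≥ min_added_chars)
  else false

-- ===== PRECONDITION & SPEC =====
-- Pre_ excludes exactly the inputs where A raises ValueError: a negative min_added_chars.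
def Pre_is_addition (old : String) (new : String) (min_added_chars : Int) : Prop :=
  0 ≤ min_added_chars
instance (old : String) (new : String) (min_added_chars : Int) : Decidable (Pre_is_addition old new min_added_chars) := by unfold Pre_is_addition; infer_instance

def pvWitness_is_addition : String × String × Int := ("abc", "a b c def", 3)

def Spec_is_addition (old : String) (new : String) (min_added_chars : Int) (out : Bool) : Prop := out = is_addition_alt old new min_added_chars
instance (old : String) (new : String) (min_added_chars : Int) (out : Bool) : Decidable (Spec_is_addition old new min_added_chars out) := by unfold Spec_is_addition; infer_instance

-- ===== CLAIM (what is proved, stated in full; the proofs are below) =====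
def Claim_equal_is_addition : Prop := ∀ (old : String) (new : String) (min_added_chars : Int), Dom_is_addition old new min_added_chars → Pre_is_addition old new min_added_chars → Spec_is_addition old new min_added_chars (is_addition old new min_added_chars)

-- ===== LEMMAS AND PROOFS =====

-- reference greedy: the suffix of l after the first occurrence of c (none if c ∉ l)
def dropPast (c : Char) : List Char → Option (List Char)
  | [] => none
  | b :: bs => if b == c then some bs else dropPast c bs

-- reference subsequence loop driven by dropPast
def loopSeq : List Char → List Char → Bool
  | [], _ => true
  | c :: os, rest =>
    match dropPast c rest with
    | none => false
    | some r => loopSeq os r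

-- reference: first listed position strictly beyond cur
def findGt (cur : Int) : List Int → Option Int
  | [] => none
  | p :: ps => if p > cur then some p else findGt cur ps

-- reference index walk without resume pointers
def loopIdx (d : PySem.Dict Char (List Int)) (cur : Int) : List Char → Bool
  | [] => true
  | c :: os =>
    match findGt cur (d.getD c []) with
    | none => false
    | some x => loopIdx d x os

-- absolute positions (offset k) of c in a list
def gIdx (c : Char) (k : Nat) : List Char → List Int
  | [] => []
  | b :: bs => if b = c then (k : Int) :: gIdx c (k + 1) bs else gIdx c (k + 1) bs

theorem cons_sublist_cons_of_ne {a c : Char} {l t : List Char} (h : a ≠ c) :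
    (a :: l).Sublist (c :: t) ↔ (a :: l).Sublist t := by
  constructor
  · intro hs
    rcases List.sublist_cons_iff.mp hs with hs' | ⟨r, hr, _⟩
    · exact hs'
    · exact absurd (List.cons_eq_cons.mp hr).1 h
  · exact fun hs => hs.trans (List.sublist_cons_self c t)

theorem loopA_le (old : List Char) (ns : List Char) (oi : Nat) (h : oi ≤ old.length) :
    loopA old oi ns ≤ old.length := by
  induction ns generalizing oi with
  | nil => simpa [loopA]
  | cons c rest ih =>
    simp only [loopA]
    split
    · exact ih _ (by split <;> omega)
    · exact h

-- A's scan matches all of old exactly when the unmatched suffix of old is a subsequence of ns.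
theorem loopA_eq_iff (old : List Char) (ns : List Char) (oi : Nat) (h : oi ≤ old.length) :
    loopA old oi ns = old.length ↔ (old.drop oi).Sublist ns := by
  induction ns generalizing oi with
  | nil =>
    simp only [loopA, List.sublist_nil, List.drop_eq_nil_iff]
    omega
  | cons c rest ih =>
    simp only [loopA]
    split
    · next hlt =>
      have hdrop : old.drop oi = old[oi] :: old.drop (oi + 1) :=
        List.drop_eq_getElem_cons hlt
      by_cases hc : old[oi] = c
      · simp only [hc, beq_self_eq_true, if_true]
        rw [ih _ (by omega), hdrop, hc, List.cons_sublist_cons]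
      · rw [if_neg (by simpa using hc), ih _ (by omega), hdrop,
          cons_sublist_cons_of_ne hc, ← hdrop]
    · next hge =>
      have : oi = old.length := by omega
      simp [this]

-- the dropPast greedy succeeds exactly on subsequences
theorem loopSeq_eq_iff (ns : List Char) (os : List Char) :
    loopSeq os ns = true ↔ os.Sublist ns := by
  induction ns generalizing os with
  | nil =>
    cases os with
    | nil => simp [loopSeq]
    | cons c os' => simp [loopSeq, dropPast]
  | cons b bs ih =>
    cases os with
    | nil => simp [loopSeq]
    | cons c os' =>
      by_cases hc : b = c
      · subst hc
        simp only [loopSeq, dropPast, beq_self_eq_true, if_true]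
        rw [ih, List.cons_sublist_cons]
      · have : dropPast c (b :: bs) = dropPast c bs := by
          simp [dropPast, hc]
        simp only [loopSeq, this]
        rw [show (match dropPast c bs with
              | none => false
              | some r => loopSeq os' r) = loopSeq (c :: os') bs from rfl, ih,
          cons_sublist_cons_of_ne (Ne.symm hc)]

-- the index built by B's first loop lists exactly the positions of each char
theorem buildPos_getD (ns : List Char) (c : Char) :
    (buildPos ns).getD c [] =
      ((PySem.List.enumerate ns 0).filter (fun p => p.2 == c)).map (·.1) := by
  have : buildPos ns =
      ((PySem.List.enumerate ns 0).map (fun p => (p.2, p.1))).foldl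
        (fun d q => d.modify q.1 [] (· ++ [q.2])) PySem.Dict.empty := by
    rw [List.foldl_map]
    rfl
  rw [this, PySem.Dict.getD_foldl_modify_append]
  simp [List.filter_map, List.map_map, Function.comp_def, PySem.Dict.getD_empty]

theorem enumerate_filter_eq_gIdx (c : Char) (l : List Char) (k : Nat) :
    ((PySem.List.enumerate l (k : Int)).filter (fun p => p.2 == c)).map (·.1) = gIdx c k l := by
  induction l generalizing k with
  | nil => simp [PySem.List.enumerate_nil, gIdx]
  | cons b bs ih =>
    rw [PySem.List.enumerate_cons]
    by_cases hb : b = c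
    · subst hb
      have := ih (k + 1)
      push_cast at this ⊢
      simp [gIdx, this]
    · have := ih (k + 1)
      push_cast at this ⊢
      simp [gIdx, hb, this]

-- findGt is the identity head when every listed position is already beyond cur
theorem findGt_gIdx_of_lt (c : Char) (l : List Char) (k : Nat) (cur : Int) (h : cur < (k : Int)) :
    findGt cur (gIdx c k l) = (gIdx c k l).head? := by
  induction l generalizing k cur with
  | nil => simp [gIdx, findGt]
  | cons b bs ih =>
    by_cases hb : b = c
    · simp [gIdx, hb, findGt, h]
    · simp only [gIdx, if_neg hb]
      exact ih (k + 1) cur (by omega)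

-- skipping positions ≤ m-1 in the index is looking at the index of the suffix from m
theorem findGt_gIdx_drop (c : Char) (l : List Char) (k m : Nat) (hkm : k ≤ m) :
    findGt ((m : Int) - 1) (gIdx c k l) = (gIdx c m (l.drop (m - k))).head? := by
  induction l generalizing k with
  | nil => simp [gIdx, findGt]
  | cons b bs ih =>
    rcases Nat.eq_or_lt_of_le hkm with heq | hlt
    · subst heq
      rw [Nat.sub_self, List.drop_zero]
      exact findGt_gIdx_of_lt c (b :: bs) k _ (by omega)
    · have hdrop : (b :: bs).drop (m - k) = bs.drop (m - (k + 1)) := by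
        have : m - k = (m - (k + 1)) + 1 := by omega
        rw [this, List.drop_succ_cons]
      by_cases hb : b = c
      · have hk : ¬ ((k : Int) > (m : Int) - 1) := by omega
        simp only [gIdx, if_pos hb, findGt, if_neg hk]
        rw [ih (k + 1) hlt, hdrop]
      · simp only [gIdx, if_neg hb]
        rw [ih (k + 1) hlt, hdrop]

-- empty index slice ↔ c does not occur
theorem gIdx_nil_iff (c : Char) (t : List Char) (k : Nat) :
    gIdx c k t = [] ↔ dropPast c t = none := by
  induction t generalizing k with
  | nil => simp [gIdx, dropPast]
  | cons b bs ih =>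
    by_cases hb : b = c
    · simp [gIdx, dropPast, hb]
    · rw [show gIdx c k (b :: bs) = gIdx c (k + 1) bs from by simp [gIdx, hb],
        show dropPast c (b :: bs) = dropPast c bs from by simp [dropPast, hb]]
      exact ih (k + 1)

-- the head of the index slice is the first occurrence, and dropping past it is the suffix
theorem gIdx_head (c : Char) (t : List Char) (k : Nat) (x : Int) (rest : List Int)
    (h : gIdx c k t = x :: rest) :
    ∃ j : Nat, x = (j : Int) ∧ k ≤ j ∧ dropPast c t = some (t.drop (j + 1 - k)) := by
  induction t generalizing k with
  | nil => simp [gIdx] at h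
  | cons b bs ih =>
    by_cases hb : b = c
    · rw [gIdx, if_pos hb] at h
      obtain ⟨hx, -⟩ := List.cons_eq_cons.mp h
      exact ⟨k, hx.symm, le_refl k, by simp [dropPast, hb]⟩
    · rw [gIdx, if_neg hb] at h
      obtain ⟨j, hx, hkj, hdp⟩ := ih (k + 1) h
      refine ⟨j, hx, by omega, ?_⟩
      rw [dropPast, if_neg (by simpa using hb), hdp]
      have h1 : j + 1 - k = (j + 1 - (k + 1)) + 1 := by omega
      rw [h1, List.drop_succ_cons]

-- the pointer-free index walk from position k-1 is the dropPast greedy on the suffix of ns from k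
theorem loopIdx_eq_loopSeq (ns : List Char) (os : List Char) (k : Nat) :
    loopIdx (buildPos ns) ((k : Int) - 1) os = loopSeq os (ns.drop k) := by
  induction os generalizing k with
  | nil => simp [loopIdx, loopSeq]
  | cons c os' ih =>
    have hidx : (buildPos ns).getD c [] = gIdx c 0 ns := by
      rw [buildPos_getD]
      exact_mod_cast enumerate_filter_eq_gIdx c ns 0
    have hfind : findGt ((k : Int) - 1) ((buildPos ns).getD c []) =
        (gIdx c k (ns.drop k)).head? := by
      rw [hidx]
      simpa using findGt_gIdx_drop c ns 0 k (Nat.zero_le k)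
    simp only [loopIdx, loopSeq, hfind]
    cases hg : gIdx c k (ns.drop k) with
    | nil =>
      simp [(gIdx_nil_iff c (ns.drop k) k).mp hg]
    | cons x rest =>
      obtain ⟨j, hx, hkj, hdp⟩ := gIdx_head c (ns.drop k) k x rest hg
      have hdrop : (ns.drop k).drop (j + 1 - k) = ns.drop (j + 1) := by
        rw [List.drop_drop]
        congr 1
        omega
      rw [hdp, hdrop]
      simp only [List.head?]
      have : x = ((j + 1 : Nat) : Int) - 1 := by push_cast; omega
      rw [this, ih (j + 1)]

theorem advance_prefix (cur : Int) (lst : List Int) (i : Nat) :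
    ∀ j, i ≤ j → j < advance cur lst i → lst.getD j 0 ≤ cur := by
  induction i using (advance.induct cur lst) with
  | case1 i h hle ih =>
    intro j hij hja
    rw [advance, dif_pos h, if_pos hle] at hja
    rcases Nat.eq_or_lt_of_le hij with rfl | hlt
    · exact hle
    · exact ih j hlt hja
  | case2 i h hle =>
    intro j hij hja
    rw [advance, dif_pos h, if_neg hle] at hja
    omega
  | case3 i h =>
    intro j hij hja
    rw [advance, dif_neg h] at hja
    omega

theorem advance_hit (cur : Int) (lst : List Int) (i : Nat)
    (h : advance cur lst i < lst.length) : cur < lst.getD (advance cur lst i) 0 := by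
  induction i using (advance.induct cur lst) with
  | case1 i hlt hle ih =>
    rw [advance, dif_pos hlt, if_pos hle] at h ⊢
    exact ih h
  | case2 i hlt hle =>
    rw [advance, dif_pos hlt, if_neg hle] at h ⊢
    omega
  | case3 i hlt =>
    rw [advance, dif_neg hlt] at h
    exact absurd h hlt

-- a pointer whose skipped prefix is ≤ cur resumes where the scan from 0 would stop
theorem advance_eq_of_prefix (cur : Int) (lst : List Int) (i : Nat) (hi : i ≤ lst.length)
    (hpre : ∀ j, j < i → lst.getD j 0 ≤ cur) :
    advance cur lst i = advance cur lst 0 := by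
  induction i with
  | zero => rfl
  | succ n ih =>
    have hn : advance cur lst n = advance cur lst 0 :=
      ih (by omega) (fun j hj => hpre j (by omega))
    have hstep : advance cur lst n = advance cur lst (n + 1) := by
      rw [advance, dif_pos (by omega), if_pos (hpre n (by omega))]
    omega

-- the advance-based scan from 0 computes findGt
theorem findGt_eq_advance (cur : Int) (lst : List Int) :
    findGt cur lst = if advance cur lst 0 < lst.length
      then some (lst.getD (advance cur lst 0) 0) else none := by
  induction lst with
  | nil => simp [findGt, advance]
  | cons x xs ih =>
    have hshift : ∀ i : Nat, advance cur (x :: xs) (i + 1) = advance cur xs i + 1 := by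
      intro i
      induction i using (advance.induct cur xs) with
      | case1 i h hle ih' =>
        conv_lhs => rw [advance]
        rw [dif_pos (show i + 1 < (x :: xs).length by simpa using Nat.succ_lt_succ h),
          show (x :: xs).getD (i + 1) 0 = xs.getD i 0 from rfl, if_pos hle, ih']
        conv_rhs => rw [advance]
        rw [dif_pos h, if_pos hle]
      | case2 i h hle =>
        conv_lhs => rw [advance]
        rw [dif_pos (show i + 1 < (x :: xs).length by simpa using Nat.succ_lt_succ h),
          show (x :: xs).getD (i + 1) 0 = xs.getD i 0 from rfl, if_neg hle]
        conv_rhs => rw [advance]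
        rw [dif_pos h, if_neg hle]
      | case3 i h =>
        conv_lhs => rw [advance]
        rw [dif_neg (show ¬ i + 1 < (x :: xs).length by simpa using fun hh => h (Nat.lt_of_succ_lt_succ hh))]
        conv_rhs => rw [advance]
        rw [dif_neg h]
    by_cases hx : x > cur
    · have h0 : advance cur (x :: xs) 0 = 0 := by
        rw [advance, dif_pos (by simp), if_neg (by simpa using hx)]
      simp [findGt, hx, h0]
    · have h0 : advance cur (x :: xs) 0 = advance cur xs 0 + 1 := by
        rw [advance, dif_pos (by simp),
          if_pos (by simpa using le_of_not_gt hx)]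
        exact hshift 0
      rw [show findGt cur (x :: xs) = findGt cur xs from by simp [findGt, hx], ih, h0]
      by_cases ha : advance cur xs 0 < xs.length
      · rw [if_pos ha, if_pos (by simpa using Nat.succ_lt_succ ha)]
        rfl
      · rw [if_neg ha, if_neg (by simpa using fun hh => ha (Nat.lt_of_succ_lt_succ hh))]

-- loop invariant of B's pointer walk: every pointer is in range and skips only positions ≤ cur
def PtrInv (pos : PySem.Dict Char (List Int)) (ptr : PySem.Dict Char Nat) (cur : Int) : Prop :=
  ∀ c : Char, ptr.getD c 0 ≤ (pos.getD c []).length ∧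
    ∀ j, j < ptr.getD c 0 → (pos.getD c []).getD j 0 ≤ cur

-- under the invariant the pointer walk computes the pointer-free walk
theorem loopPtr_eq_loopIdx (pos : PySem.Dict Char (List Int)) (ptr : PySem.Dict Char Nat)
    (cur : Int) (os : List Char) (hinv : PtrInv pos ptr cur) :
    loopPtr pos ptr cur os = loopIdx pos cur os := by
  induction os generalizing ptr cur with
  | nil => simp [loopPtr, loopIdx]
  | cons c os' ih =>
    obtain ⟨hle, hpre⟩ := hinv c
    have h0 : advance cur (pos.getD c []) (ptr.getD c 0) = advance cur (pos.getD c []) 0 :=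
      advance_eq_of_prefix cur (pos.getD c []) (ptr.getD c 0) hle hpre
    have hfind := findGt_eq_advance cur (pos.getD c [])
    simp only [loopPtr, loopIdx, h0, hfind]
    by_cases ha : advance cur (pos.getD c []) 0 < (pos.getD c []).length
    · rw [if_pos ha, if_pos ha]
      set a := advance cur (pos.getD c []) 0 with hadef
      have hcur : cur < (pos.getD c []).getD a 0 := by
        have := advance_hit cur (pos.getD c []) (ptr.getD c 0)
        rw [h0] at this
        exact this ha
      apply ih
      intro c'
      by_cases hc' : c' = c
      · subst hc'
        rw [PySem.Dict.getD_insert, if_pos rfl]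
        refine ⟨by omega, ?_⟩
        intro j hj
        rcases Nat.lt_or_ge j (ptr.getD c' 0) with hj' | hj'
        · exact le_trans (hpre j hj') (le_of_lt hcur)
        · rcases Nat.lt_or_ge j a with hja | hja
          · have := advance_prefix cur (pos.getD c' []) (ptr.getD c' 0) j hj' (by rw [h0]; exact hja)
            exact le_trans this (le_of_lt hcur)
          · have : j = a := by omega
            rw [this]
      · rw [PySem.Dict.getD_insert, if_neg hc']
        obtain ⟨h1, h2⟩ := hinv c'
        exact ⟨h1, fun j hj => le_trans (h2 j hj) (le_of_lt hcur)⟩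
    · rw [if_neg ha, if_neg ha]

theorem loops_agree (old ns : List Char) :
    (loopA old 0 ns < old.length) ↔ loopPtr (buildPos ns) PySem.Dict.empty (-1) old = false := by
  have hle := loopA_le old ns 0 (Nat.zero_le _)
  have h1 := loopA_eq_iff old ns 0 (Nat.zero_le _)
  have hPtr : loopPtr (buildPos ns) PySem.Dict.empty (-1) old = loopSeq old ns := by
    have hinv : PtrInv (buildPos ns) PySem.Dict.empty (-1) := by
      intro c
      rw [PySem.Dict.getD_empty]
      exact ⟨Nat.zero_le _, fun j hj => absurd hj (Nat.not_lt_zero j)⟩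
    rw [loopPtr_eq_loopIdx (buildPos ns) PySem.Dict.empty (-1) old hinv]
    have := loopIdx_eq_loopSeq ns old 0
    simpa using this
  have h2 := loopSeq_eq_iff ns old
  simp only [List.drop_zero] at h1
  constructor
  · intro hlt
    cases hb : loopPtr (buildPos ns) PySem.Dict.empty (-1) old
    · rfl
    · rw [hPtr] at hb
      exact absurd (h1.mpr (h2.mp hb)) (by omega)
  · intro hb
    rcases Nat.lt_or_ge (loopA old 0 ns) old.length with h | h
    · exact h
    · have := h2.mpr (h1.mp (by omega))
      rw [hPtr] at hb
      simp [hb] at this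

-- ===== VERDICT (by name: the statement is the Claim_ definition above) =====
theorem is_addition_spec : Claim_equal_is_addition := by
  intro old new m _ _
  unfold Spec_is_addition is_addition is_addition_alt
  rcases loops_agree old.toList new.toList with ⟨h1, h2⟩
  by_cases hlt : loopA old.toList 0 new.toList < old.toList.length
  · have hlt' : loopA old.toList 0 new.toList < old.length := by simpa using hlt
    simp [h1 hlt, hlt']
  · have hb : loopPtr (buildPos new.toList) PySem.Dict.empty (-1) old.toList = true := by
      cases hbb : loopPtr (buildPos new.toList) PySem.Dict.empty (-1) old.toList
      · exact absurd (h2 hbb) hlt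
      · rfl
    have hlt' : ¬ loopA old.toList 0 new.toList < old.length := by simpa using hlt
    simp [hb, hlt']
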